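-- pv_equiv track=rewrite | github.com/iZelikov/beegeek-algo | task_10_2.py | count_triplets_with_sum
-- ===== SOURCE A (Python) =====
-- from collections import defaultdict, Counter
--
-- def count_triplets_with_sum(nums1, nums2, nums3, k):
--     triplets_count = 0
--     n1 = Counter(nums1)
--     n2 = Counter(nums2)
--     n3 = Counter(nums3)
--     for a, a_count in n1.items():
--         for b, b_count in n2.items():
--             triplets_count += n3[k - a - b] * a_count * b_count
--     return triplets_count
-- ===== SOURCE B (Python) =====
-- from collections import Counter
--
-- def count_triplets_with_sum(nums1, nums2, nums3, k):
--     pair_sums = Counter(a + b for a in nums1 for b in nums2)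
--     return sum(pair_sums[k - c] for c in nums3)
-- ===== Notes on version B (the rewrite author's own statement) =====
-- stated objective: alternative
-- what changed: B materializes a Counter of all pair sums nums1+nums2 first and then counts matches in a separate single pass over nums3, instead of A's nested loop over two value Counters that looks k-a-b up in a third Counter inside the inner loop.
import Mathlib
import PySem

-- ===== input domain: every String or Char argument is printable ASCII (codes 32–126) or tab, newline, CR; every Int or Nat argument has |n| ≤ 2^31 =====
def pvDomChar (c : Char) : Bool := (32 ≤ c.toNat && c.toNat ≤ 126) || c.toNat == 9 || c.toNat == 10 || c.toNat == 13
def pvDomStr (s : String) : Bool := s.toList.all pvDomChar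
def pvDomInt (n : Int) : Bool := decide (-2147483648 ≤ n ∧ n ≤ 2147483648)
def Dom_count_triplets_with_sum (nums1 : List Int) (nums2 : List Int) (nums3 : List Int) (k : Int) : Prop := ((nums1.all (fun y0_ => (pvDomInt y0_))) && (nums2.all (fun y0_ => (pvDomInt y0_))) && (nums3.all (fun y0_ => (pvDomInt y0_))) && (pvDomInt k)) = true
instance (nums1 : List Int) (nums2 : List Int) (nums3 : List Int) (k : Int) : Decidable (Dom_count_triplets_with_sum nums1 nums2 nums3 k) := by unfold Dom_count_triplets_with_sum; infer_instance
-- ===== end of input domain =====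

-- B builds a Counter of all pair sums a+b first, then counts matches in a separate pass over nums3 (alternative decomposition, same exact counts).

-- ===== PORT A =====
def count_triplets_with_sum (nums1 : List Int) (nums2 : List Int) (nums3 : List Int) (k : Int) : Int :=
  let n1 := PySem.Dict.counter nums1
  let n2 := PySem.Dict.counter nums2
  let n3 := PySem.Dict.counter nums3
  n1.items.foldl (fun acc p =>
    n2.items.foldl (fun acc q =>
      acc + n3.getD (k - p.1 - q.1) 0 * p.2 * q.2) acc) 0

-- ===== PORT B =====
def count_triplets_with_sum_alt (nums1 : List Int) (nums2 : List Int) (nums3 : List Int) (k : Int) : Int :=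
  let pair_sums := PySem.Dict.counter (nums1.flatMap (fun a => nums2.map (fun b => a + b)))
  nums3.foldl (fun acc c => acc + pair_sums.getD (k - c) 0) 0

-- ===== PRECONDITION & SPEC =====
def Spec_count_triplets_with_sum (nums1 : List Int) (nums2 : List Int) (nums3 : List Int) (k : Int) (out : Int) : Prop := out = count_triplets_with_sum_alt nums1 nums2 nums3 k
instance (nums1 : List Int) (nums2 : List Int) (nums3 : List Int) (k : Int) (out : Int) : Decidable (Spec_count_triplets_with_sum nums1 nums2 nums3 k out) := by unfold Spec_count_triplets_with_sum; infer_instance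

-- ===== CLAIM (what is proved, stated in full; the proofs are below) =====
def Claim_equal_count_triplets_with_sum : Prop := ∀ (nums1 : List Int) (nums2 : List Int) (nums3 : List Int) (k : Int), Dom_count_triplets_with_sum nums1 nums2 nums3 k → Spec_count_triplets_with_sum nums1 nums2 nums3 k (count_triplets_with_sum nums1 nums2 nums3 k)

-- ===== LEMMAS AND PROOFS =====

-- sum of an indicator over a nodup list containing x
theorem pv_sum_ite (d : List Int) (x : Int) (c : Int) (hd : d.Nodup) (hx : x ∈ d) :
    (d.map (fun a => if a = x then c else 0)).sum = c := by
  induction d with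
  | nil => cases hx
  | cons y t ih =>
    have hnd := List.nodup_cons.mp hd
    simp only [List.map_cons, List.sum_cons]
    by_cases h : y = x
    · subst h
      have hz : (t.map (fun a => if a = y then c else 0)).sum = 0 := by
        apply List.sum_eq_zero
        intro z hz
        rcases List.mem_map.mp hz with ⟨a, ha, rfl⟩
        have hay : a ≠ y := fun e => hnd.1 (e ▸ ha)
        simp [hay]
      simp [hz]
    · have hxt : x ∈ t := by
        rcases List.mem_cons.mp hx with h' | h'
        · exact absurd h'.symm h
        · exact h'
      rw [if_neg h, ih hnd.2 hxt]
      ring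

-- a 0/1-indicator sum is a count
theorem pv_sum_indicator (l : List Int) (v : Int) :
    (l.map (fun b => if b = v then (1 : Int) else 0)).sum = (l.count v : Int) := by
  induction l with
  | nil => simp
  | cons x t ih =>
    by_cases h : x = v <;>
      simp [h, ih, add_comm]

-- ∑ over the distinct values of l of count·g = ∑ over l of g
theorem pv_sum_counter (l : List Int) (g : Int → Int) :
    ((PySem.Set.ofList l).map (fun a => (l.count a : Int) * g a)).sum = (l.map g).sum := by
  suffices h : ∀ (d : List Int), d.Nodup → (∀ x ∈ l, x ∈ d) →
      (d.map (fun a => (l.count a : Int) * g a)).sum = (l.map g).sum by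
    exact h _ (PySem.Set.nodup_ofList l) (fun x hx => (PySem.Set.mem_ofList l x).mpr hx)
  intro d hd hmem
  induction l with
  | nil => simp
  | cons x t ih =>
    have hx : x ∈ d := hmem x (List.mem_cons_self ..)
    have hmem' : ∀ y ∈ t, y ∈ d := fun y hy => hmem y (List.mem_cons_of_mem _ hy)
    have step : ∀ a : Int, ((x :: t).count a : Int) * g a
        = (t.count a : Int) * g a + (if a = x then g x else 0) := by
      intro a
      by_cases h : a = x
      · have h1 : (x :: t).count a = t.count a + 1 := by simp [h]
        rw [h1, if_pos h, h]; push_cast; ring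
      · have hxa : ¬ x = a := fun e => h e.symm
        have h1 : (x :: t).count a = t.count a := by simp [hxa]
        rw [h1, if_neg h]; ring
    calc (d.map (fun a => ((x :: t).count a : Int) * g a)).sum
        = (d.map (fun a => (t.count a : Int) * g a + (if a = x then g x else 0))).sum := by
          congr 1; exact List.map_congr_left fun a _ => step a
      _ = (d.map (fun a => (t.count a : Int) * g a)).sum
          + (d.map (fun a => if a = x then g x else 0)).sum := List.sum_map_add
      _ = (t.map g).sum + g x := by rw [ih hmem', pv_sum_ite d x (g x) hd hx]
      _ = ((x :: t).map g).sum := by simp [add_comm]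

-- swap a double list sum
theorem pv_sum_swap (l m : List Int) (f : Int → Int → Int) :
    (l.map (fun x => (m.map (fun y => f x y)).sum)).sum
      = (m.map (fun y => (l.map (fun x => f x y)).sum)).sum := by
  induction l with
  | nil => simp
  | cons x t ih =>
    simp only [List.map_cons, List.sum_cons, ih, List.sum_map_add]

-- pair-count symmetry: matches of s as b + c, counted from either side
theorem pv_symm (m n : List Int) (s : Int) :
    (m.map (fun b => (n.count (s - b) : Int))).sum
      = (n.map (fun c => (m.count (s - c) : Int))).sum := by
  calc (m.map (fun b => (n.count (s - b) : Int))).sum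
      = (m.map (fun b => (n.map (fun c => if c = s - b then (1 : Int) else 0)).sum)).sum := by
        congr 1; exact List.map_congr_left fun b _ => (pv_sum_indicator n (s - b)).symm
    _ = (n.map (fun c => (m.map (fun b => if c = s - b then (1 : Int) else 0)).sum)).sum :=
        pv_sum_swap m n _
    _ = (n.map (fun c => (m.count (s - c) : Int))).sum := by
        congr 1
        apply List.map_congr_left
        intro c _
        rw [← pv_sum_indicator m (s - c)]
        congr 1
        apply List.map_congr_left
        intro b _
        by_cases h : b = s - c
        · rw [if_pos (by omega), if_pos h]
        · rw [if_neg (by omega), if_neg h]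

-- a nested additive foldl is a double sum
theorem pv_foldl_foldl (l1 l2 : List (Int × Int)) (h : Int × Int → Int × Int → Int) (init : Int) :
    l1.foldl (fun acc p => l2.foldl (fun acc q => acc + h p q) acc) init
      = init + (l1.map (fun p => (l2.map (fun q => h p q)).sum)).sum := by
  induction l1 generalizing init with
  | nil => simp
  | cons x t ih =>
    rw [List.foldl_cons, PySem.List.foldl_add, ih, List.map_cons, List.sum_cons]
    ring

-- canonical form of A
theorem pv_A_eq (nums1 nums2 nums3 : List Int) (k : Int) :
    count_triplets_with_sum nums1 nums2 nums3 k
      = (nums1.map (fun a => (nums2.map (fun b => (nums3.count (k - a - b) : Int))).sum)).sum := by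
  unfold count_triplets_with_sum
  simp only [PySem.Dict.items_counter]
  rw [pv_foldl_foldl _ _ (fun p q => (PySem.Dict.counter nums3).getD (k - p.1 - q.1) 0 * p.2 * q.2)]
  simp only [zero_add, List.map_map, Function.comp_def, PySem.Dict.getD_counter]
  calc ((PySem.Set.ofList nums1).map (fun a =>
        ((PySem.Set.ofList nums2).map (fun b =>
          (nums3.count (k - a - b) : Int) * (nums1.count a : Int) * (nums2.count b : Int))).sum)).sum
      = ((PySem.Set.ofList nums1).map (fun a => (nums1.count a : Int) *
          ((PySem.Set.ofList nums2).map (fun b =>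
            (nums2.count b : Int) * (nums3.count (k - a - b) : Int))).sum)).sum := by
        congr 1
        apply List.map_congr_left
        intro a _
        rw [← List.sum_map_mul_left]
        congr 1
        exact List.map_congr_left fun b _ => by ring
    _ = ((PySem.Set.ofList nums1).map (fun a => (nums1.count a : Int) *
          (nums2.map (fun b => (nums3.count (k - a - b) : Int))).sum)).sum := by
        congr 1
        exact List.map_congr_left fun a _ => by
          rw [pv_sum_counter nums2 (fun b => (nums3.count (k - a - b) : Int))]
    _ = _ := pv_sum_counter nums1 _

-- counting a value among all pair sums
theorem pv_count_pairs (nums1 nums2 : List Int) (v : Int) :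
    ((nums1.flatMap (fun a => nums2.map (fun b => a + b))).count v : Int)
      = (nums1.map (fun a => (nums2.count (v - a) : Int))).sum := by
  induction nums1 with
  | nil => simp
  | cons x t ih =>
    simp only [List.flatMap_cons, List.map_cons, List.sum_cons, ← ih]
    rw [List.count_append]
    push_cast
    congr 1
    have h := List.count_map_of_injective nums2 (fun b => x + b)
      (fun p q hpq => by simpa using hpq) (v - x)
    simpa using h

-- canonical form of B
theorem pv_B_eq (nums1 nums2 nums3 : List Int) (k : Int) :
    count_triplets_with_sum_alt nums1 nums2 nums3 k
      = (nums1.map (fun a => (nums2.map (fun b => (nums3.count (k - a - b) : Int))).sum)).sum := by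
  unfold count_triplets_with_sum_alt
  rw [PySem.List.foldl_add]
  simp only [zero_add, PySem.Dict.getD_counter]
  calc (nums3.map (fun c =>
        ((nums1.flatMap (fun a => nums2.map (fun b => a + b))).count (k - c) : Int))).sum
      = (nums3.map (fun c => (nums1.map (fun a => (nums2.count (k - c - a) : Int))).sum)).sum := by
        congr 1; exact List.map_congr_left fun c _ => pv_count_pairs nums1 nums2 (k - c)
    _ = (nums1.map (fun a => (nums3.map (fun c => (nums2.count (k - c - a) : Int))).sum)).sum :=
        pv_sum_swap nums3 nums1 _
    _ = (nums1.map (fun a => (nums3.map (fun c => (nums2.count (k - a - c) : Int))).sum)).sum := by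
        congr 1
        apply List.map_congr_left
        intro a _
        congr 1
        exact List.map_congr_left fun c _ => by rw [sub_right_comm]
    _ = _ := by
        congr 1
        exact List.map_congr_left fun a _ => (pv_symm nums2 nums3 (k - a)).symm

-- ===== VERDICT (by name: the statement is the Claim_ definition above) =====
theorem count_triplets_with_sum_spec : Claim_equal_count_triplets_with_sum := by
  intro nums1 nums2 nums3 k _
  unfold Spec_count_triplets_with_sum
  rw [pv_A_eq, pv_B_eq]
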